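-- pv_equiv track=rewrite | github.com/tsundvoll/aoc | aoc_2020/day_14/solution.py | find_permutations
-- ===== SOURCE A (Python) =====
-- def find_permutations(masked_address):
--     s = masked_address
--     positions = [pos for pos, char in enumerate(s) if char == "X"]
--     n_positions = len(positions)
--     combinations = [bin(x).split('b')[1].zfill(n_positions) for x in range(2**n_positions)]
--
--     permutations = []
--     for comb in combinations:
--         permutation = list(masked_address)
--         for i, pos in enumerate(positions):
--             c = comb[i]
--             permutation[pos] = comb[i]
--         permutations.append("".join(permutation))
--
--     return permutations
-- ===== SOURCE B (Python) =====
-- def find_permutations(masked_address):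
--     expansions = ['']
--     for ch in masked_address:
--         if ch == 'X':
--             expansions = [e + b for e in expansions for b in '01']
--         else:
--             expansions = [e + ch for e in expansions]
--     return expansions
-- ===== Notes on version B (the rewrite author's own statement) =====
-- stated objective: simpler
-- what changed: A collects the X positions, counts through all binary words with bin()+zfill and writes each decoded bit back by index; B makes one pass over the string, maintaining the list of expansions of the prefix read so far and extending each by the current character, or by both bit characters at a wildcard, so no position list, counter or index arithmetic remains.
import Mathlib
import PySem

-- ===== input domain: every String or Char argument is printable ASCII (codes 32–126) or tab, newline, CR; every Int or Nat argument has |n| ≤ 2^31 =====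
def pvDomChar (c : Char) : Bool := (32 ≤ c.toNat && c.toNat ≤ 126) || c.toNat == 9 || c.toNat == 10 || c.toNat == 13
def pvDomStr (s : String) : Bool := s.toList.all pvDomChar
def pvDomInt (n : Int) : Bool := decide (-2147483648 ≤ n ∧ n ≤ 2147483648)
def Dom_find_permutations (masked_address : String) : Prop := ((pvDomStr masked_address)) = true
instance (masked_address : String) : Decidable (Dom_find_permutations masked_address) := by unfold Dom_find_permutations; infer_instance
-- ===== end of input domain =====

-- B replaces A's position list + binary counter + zfill decoding by a single pass that keeps
-- the list of expansions of the prefix read so far (objective: simpler; no speed claim).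

-- ===== PORT A =====
-- bin(x).split('b')[1] is the binary digit string of x (x ≥ 0 here): PySem.Int.toBinChars.
-- comb[i] is always in range (|comb| ≥ n_positions), so the pyGetD default ' ' is never used;
-- likewise permutation[pos] = … is always in range (pySetD).  "".join over single chars = String.ofList.
def find_permutations (masked_address : String) : List String :=
  let s := masked_address.toList
  let positions : List Int :=
    ((PySem.List.enumerate s).filter (fun pc => pc.2 = 'X')).map (fun pc => pc.1)
  let n_positions : Nat := positions.length
  let combinations : List (List Char) :=
    (PySem.List.pyRange 0 ((2 : Int) ^ n_positions) 1).map
      (fun x => PySem.Chars.zfill (PySem.Int.toBinChars x) (n_positions : Int))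
  combinations.foldl
    (fun perms comb =>
      let permutation :=
        (PySem.List.enumerate positions).foldl
          (fun perm ipos => PySem.List.pySetD perm ipos.2 (PySem.List.pyGetD comb ipos.1 ' '))
          s
      perms ++ [String.ofList permutation]) []

-- ===== PORT B =====
-- Source B's loop over the characters; 'for b in '01'' is a map over ['0','1'];
-- string concatenation e + b / e + ch becomes ++ on the char list, strings rebuilt at the end.
def find_permutations_alt (masked_address : String) : List String :=
  (masked_address.toList.foldl
    (fun exps ch =>
      if ch = 'X' then exps.flatMap (fun e => ['0', '1'].map (fun b => e ++ [b]))
      else exps.map (fun e => e ++ [ch]))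
    [[]]).map (fun r => String.ofList r)

-- ===== PRECONDITION & SPEC =====
def Spec_find_permutations (masked_address : String) (out : List String) : Prop := out = find_permutations_alt masked_address
instance (masked_address : String) (out : List String) : Decidable (Spec_find_permutations masked_address out) := by unfold Spec_find_permutations; infer_instance

-- ===== CLAIM (what is proved, stated in full; the proofs are below) =====
def Claim_equal_find_permutations : Prop := ∀ (masked_address : String), Dom_find_permutations masked_address → Spec_find_permutations masked_address (find_permutations masked_address)

-- ===== LEMMAS AND PROOFS =====

-- all expansions of a suffix, structurally (recursive form of B's loop)
def expandAlt : List Char → List (List Char)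
  | [] => [[]]
  | c :: t =>
    let rest := expandAlt t
    if c ≠ 'X' then rest.map (fun r => c :: r)
    else rest.map (fun r => '0' :: r) ++ rest.map (fun r => '1' :: r)

-- X positions of s, as Nats, structurally
def posNat : List Char → List Nat
  | [] => []
  | c :: t => (if c = 'X' then [0] else []) ++ (posNat t).map (· + 1)

-- substitute the bits bs into the 'X' slots of s, left to right
def fill : List Char → List Char → List Char
  | [], _ => []
  | c :: t, bs =>
    if c = 'X' then
      match bs with
      | b :: bs' => b :: fill t bs'
      | [] => c :: fill t []
    else c :: fill t bs

-- all bit strings of length n, counting order (MSB first)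
def bits : Nat → List (List Char)
  | 0 => [[]]
  | n + 1 => (bits n).map (fun w => '0' :: w) ++ (bits n).map (fun w => '1' :: w)

-- A's padded binary word for counter value x with n slots
def pb (n x : Nat) : List Char :=
  PySem.Chars.zfill (PySem.Int.toBinChars (x : Int)) (n : Int)

-- ---- Nat.toDigits 2 facts ----

theorem tdc_acc (f : Nat) : ∀ (n : Nat) (acc : List Char),
    Nat.toDigitsCore 2 f n acc = Nat.toDigitsCore 2 f n [] ++ acc := by
  induction f with
  | zero => intro n acc; simp [Nat.toDigitsCore]
  | succ f ih =>
    intro n acc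
    simp only [Nat.toDigitsCore]
    by_cases h : n / 2 = 0
    · simp [h]
    · simp only [h, if_false]
      rw [ih (n / 2) ((n % 2).digitChar :: acc), ih (n / 2) [(n % 2).digitChar]]
      simp

theorem tdc_fuel (f : Nat) : ∀ (g n : Nat) (acc : List Char), n < f → n < g →
    Nat.toDigitsCore 2 f n acc = Nat.toDigitsCore 2 g n acc := by
  induction f with
  | zero => intro g n acc h; omega
  | succ f ih =>
    intro g n acc hf hg
    cases g with
    | zero => omega
    | succ g =>
      simp only [Nat.toDigitsCore]
      by_cases h : n / 2 = 0
      · simp [h]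
      · simp only [h, if_false]
        exact ih g (n / 2) _ (by omega) (by omega)

theorem tdc_chars (f : Nat) : ∀ (n : Nat) (acc : List Char),
    (∀ c ∈ acc, c = '0' ∨ c = '1') → ∀ c ∈ Nat.toDigitsCore 2 f n acc, c = '0' ∨ c = '1' := by
  induction f with
  | zero => intro n acc hacc; simpa [Nat.toDigitsCore] using hacc
  | succ f ih =>
    intro n acc hacc
    have hd : (n % 2).digitChar = '0' ∨ (n % 2).digitChar = '1' := by
      rcases Nat.mod_two_eq_zero_or_one n with h | h <;> simp [h, Nat.digitChar]
    simp only [Nat.toDigitsCore]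
    by_cases h : n / 2 = 0
    · simp only [h, if_true]
      intro c hc
      rcases List.mem_cons.mp hc with rfl | hc
      · exact hd
      · exact hacc c hc
    · simp only [h, if_false]
      refine ih (n / 2) _ ?_
      intro c hc
      rcases List.mem_cons.mp hc with rfl | hc
      · exact hd
      · exact hacc c hc

theorem td_chars (n : Nat) : ∀ c ∈ Nat.toDigits 2 n, c = '0' ∨ c = '1' :=
  tdc_chars (n + 1) n [] (by simp)

theorem td_snoc (y b : Nat) (hy : 1 ≤ y) (hb : b < 2) :
    Nat.toDigits 2 (2 * y + b) = Nat.toDigits 2 y ++ [b.digitChar] := by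
  have hdiv : (2 * y + b) / 2 = y := by omega
  have hmod : (2 * y + b) % 2 = b := by omega
  show Nat.toDigitsCore 2 (2 * y + b + 1) (2 * y + b) [] = _
  rw [show 2 * y + b + 1 = (2 * y + b) + 1 from rfl]
  simp only [Nat.toDigitsCore]
  have hne : ¬ (2 * y + b) / 2 = 0 := by omega
  simp only [hdiv, hmod]
  rw [if_neg (show ¬ y = 0 by omega)]
  rw [tdc_fuel (2 * y + b) (y + 1) y [b.digitChar] (by omega) (by omega)]
  rw [tdc_acc (y + 1) y [b.digitChar]]
  rfl

-- ---- zfill / pb facts ----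

theorem zfill_digits (cs : List Char) (h : ∀ c ∈ cs, c = '0' ∨ c = '1') (w : Int) :
    PySem.Chars.zfill cs w = List.replicate (w.toNat - cs.length) '0' ++ cs := by
  unfold PySem.Chars.zfill
  by_cases hw : w ≤ (cs.length : Int)
  · have : w.toNat - cs.length = 0 := by omega
    simp [hw, this]
  · simp only [hw, if_false]
    cases cs with
    | nil => simp
    | cons c rest =>
      have hc := h c List.mem_cons_self
      have hsign : ¬ (c = '+' ∨ c = '-') := by
        rcases hc with rfl | rfl <;> simp
      simp [hsign]

theorem toBinChars_natCast (x : Nat) :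
    PySem.Int.toBinChars (x : Int) = Nat.toDigits 2 x := by
  unfold PySem.Int.toBinChars
  simp

theorem pb_eq (n x : Nat) :
    pb n x = List.replicate (n - (Nat.toDigits 2 x).length) '0' ++ Nat.toDigits 2 x := by
  unfold pb
  rw [toBinChars_natCast, zfill_digits _ (td_chars x)]
  simp

theorem td_len_le (n y : Nat) (hn : 1 ≤ n) (hy : y < 2 ^ n) :
    (Nat.toDigits 2 y).length ≤ n :=
  Nat.toDigits_length 2 y n hn hy

theorem pb_pair (n y b : Nat) (hn : 1 ≤ n) (hy : y < 2 ^ n) (hb : b < 2) :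
    pb (n + 1) (2 * y + b) = pb n y ++ [b.digitChar] := by
  rcases Nat.eq_zero_or_pos y with rfl | hpos
  · -- y = 0 : 2*y+b = b, toDigits 2 b is a single digit
    have hb2 : b = 0 ∨ b = 1 := by omega
    have hrep : List.replicate n '0' = List.replicate (n - 1) '0' ++ ['0'] := by
      conv_lhs => rw [show n = (n - 1) + 1 by omega, List.replicate_succ']
    rcases hb2 with rfl | rfl
    · rw [pb_eq, pb_eq]
      simp only [Nat.mul_zero, Nat.zero_add]
      show List.replicate (n + 1 - 1) '0' ++ ['0'] =
        (List.replicate (n - 1) '0' ++ ['0']) ++ [Nat.digitChar 0]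
      rw [Nat.add_sub_cancel, hrep]
      simp [Nat.digitChar]
    · rw [pb_eq, pb_eq]
      show List.replicate (n + 1 - 1) '0' ++ ['1'] =
        (List.replicate (n - 1) '0' ++ ['0']) ++ [Nat.digitChar 1]
      rw [Nat.add_sub_cancel, hrep]
      simp [Nat.digitChar]
  · rw [pb_eq, pb_eq, td_snoc y b hpos hb]
    have hlen : (Nat.toDigits 2 y).length ≤ n := td_len_le n y hn hy
    rw [List.length_append]
    simp only [List.length_singleton]
    have : n + 1 - ((Nat.toDigits 2 y).length + 1) = n - (Nat.toDigits 2 y).length := by omega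
    rw [this, List.append_assoc]

-- ---- counting-order words = bits ----

theorem pv_range_two_mul (m : Nat) :
    List.range (2 * m) = (List.range m).flatMap (fun y => [2 * y, 2 * y + 1]) := by
  induction m with
  | zero => simp
  | succ m ih =>
    have : 2 * (m + 1) = (2 * m + 1) + 1 := by omega
    rw [this, List.range_succ, List.range_succ, List.range_succ, List.flatMap_append, ← ih]
    simp [List.append_assoc]

theorem bits_snoc (n : Nat) :
    bits (n + 1) = (bits n).flatMap (fun w => [w ++ ['0'], w ++ ['1']]) := by
  induction n with
  | zero => rfl
  | succ n ih =>
    conv_lhs => rw [show bits (n+1+1) = (bits (n+1)).map (fun w => '0' :: w) ++ (bits (n+1)).map (fun w => '1' :: w) from rfl, ih]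
    conv_rhs => rw [show bits (n+1) = (bits n).map (fun w => '0' :: w) ++ (bits n).map (fun w => '1' :: w) from rfl]
    rw [List.map_flatMap, List.map_flatMap, List.flatMap_append, List.flatMap_map, List.flatMap_map]
    simp [List.cons_append]

theorem pb_zero : pb 0 0 = ['0'] := by decide

theorem map_pb_eq_bits (n : Nat) (hn : 1 ≤ n) :
    (List.range (2 ^ n)).map (pb n) = bits n := by
  induction n with
  | zero => omega
  | succ n ih =>
    rcases Nat.eq_zero_or_pos n with rfl | hpos
    · decide
    · have h2 : 2 ^ (n + 1) = 2 * 2 ^ n := by rw [Nat.pow_succ]; ring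
      rw [h2, pv_range_two_mul, List.map_flatMap]
      have hcong : ∀ y ∈ List.range (2 ^ n),
          [pb (n+1) (2*y), pb (n+1) (2*y+1)] = [pb n y ++ ['0'], pb n y ++ ['1']] := by
        intro y hy
        have hy' : y < 2 ^ n := List.mem_range.mp hy
        have h0 := pb_pair n y 0 hpos hy' (by omega)
        have h1 := pb_pair n y 1 hpos hy' (by omega)
        simp only [Nat.add_zero] at h0
        rw [h0, h1]
        simp [Nat.digitChar]
      calc (List.range (2^n)).flatMap (fun y => [pb (n+1) (2*y), pb (n+1) (2*y+1)])
          = (List.range (2^n)).flatMap (fun y => [pb n y ++ ['0'], pb n y ++ ['1']]) := by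
            rw [List.flatMap_def, List.flatMap_def, List.map_congr_left hcong]
        _ = ((List.range (2^n)).map (pb n)).flatMap (fun w => [w ++ ['0'], w ++ ['1']]) := by
            rw [List.flatMap_map]
        _ = (bits n).flatMap (fun w => [w ++ ['0'], w ++ ['1']]) := by rw [ih hpos]
        _ = bits (n + 1) := (bits_snoc n).symm

-- ---- fill / expandAlt ----

def cx (s : List Char) : Nat := (posNat s).length

theorem cx_X (t : List Char) : cx ('X' :: t) = cx t + 1 := by
  simp [cx, posNat]

theorem cx_nonX (c : Char) (t : List Char) (h : c ≠ 'X') : cx (c :: t) = cx t := by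
  simp [cx, posNat, h]

theorem fill_noX (t : List Char) (h : cx t = 0) : ∀ bs, fill t bs = t := by
  induction t with
  | nil => intro bs; rfl
  | cons c t ih =>
    intro bs
    have hc : ¬ c = 'X' := by
      intro hc; subst hc; rw [cx_X] at h; omega
    have ht : cx t = 0 := by rw [cx_nonX c t hc] at h; exact h
    simp [fill, hc, ih ht]

theorem bits_len (n : Nat) : ∀ w ∈ bits n, w.length = n := by
  induction n with
  | zero => intro w hw; simp [bits] at hw; simp [hw]
  | succ n ih =>
    intro w hw
    simp only [bits, List.mem_append, List.mem_map] at hw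
    rcases hw with ⟨v, hv, rfl⟩ | ⟨v, hv, rfl⟩ <;> simp [ih v hv]

theorem map_fill_bits (s : List Char) :
    (bits (cx s)).map (fill s) = expandAlt s := by
  induction s with
  | nil => rfl
  | cons c t ih =>
    by_cases hc : c = 'X'
    · subst hc
      rw [cx_X,
          show bits (cx t + 1)
            = (bits (cx t)).map (fun w => '0' :: w) ++ (bits (cx t)).map (fun w => '1' :: w)
            from rfl,
          List.map_append, List.map_map, List.map_map]
      have h0 : fill ('X' :: t) ∘ (fun w => '0' :: w) = fun w => '0' :: fill t w := by
        funext w; simp [fill]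
      have h1 : fill ('X' :: t) ∘ (fun w => '1' :: w) = fun w => '1' :: fill t w := by
        funext w; simp [fill]
      rw [h0, h1,
          show expandAlt ('X' :: t)
            = (expandAlt t).map (fun r => '0' :: r) ++ (expandAlt t).map (fun r => '1' :: r)
            from by simp [expandAlt],
          ← ih, List.map_map, List.map_map]
      rfl
    · rw [cx_nonX c t hc,
          show expandAlt (c :: t) = (expandAlt t).map (fun r => c :: r)
            from by simp [expandAlt, hc],
          ← ih, List.map_map]
      apply List.map_congr_left
      intro w _
      simp [fill, hc]

theorem expandAlt_noX (t : List Char) (h : cx t = 0) : expandAlt t = [t] := by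
  have := map_fill_bits t
  rw [h] at this
  simpa [bits, fill_noX t h] using this.symm

-- ---- A's inner loop = fill ----

theorem posOf_shift (t : List Char) : ∀ (k : Int),
    ((PySem.List.enumerate t k).filter (fun pc => decide (pc.2 = 'X'))).map (fun pc => pc.1)
      = (posNat t).map (fun (p : Nat) => k + (p : Int)) := by
  induction t with
  | nil => intro k; simp [PySem.List.enumerate, posNat]
  | cons c t ih =>
    intro k
    rw [PySem.List.enumerate_cons]
    by_cases hc : c = 'X'
    · subst hc
      rw [List.filter_cons_of_pos (by simp), List.map_cons,
          show posNat ('X' :: t) = 0 :: (posNat t).map (· + 1) from by simp [posNat],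
          List.map_cons, ih (k + 1), List.map_map]
      congr 1
      · simp
      · apply List.map_congr_left; intro p _
        simp only [Function.comp_apply]; push_cast; ring
    · rw [List.filter_cons_of_neg (by simp [hc]),
          show posNat (c :: t) = (posNat t).map (· + 1) from by simp [posNat, hc],
          ih (k + 1), List.map_map]
      apply List.map_congr_left; intro p _
      simp only [Function.comp_apply]; push_cast; ring

theorem pySetD_mid (pre : List Char) (c : Char) (t : List Char) (v : Char) :
    PySem.List.pySetD (pre ++ c :: t) (pre.length : Int) v = pre ++ v :: t := by
  unfold PySem.List.pySetD PySem.List.pySet?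
  have hidx : PySem.List.pyIdx? (pre ++ c :: t).length (pre.length : Int) = some pre.length := by
    unfold PySem.List.pyIdx?
    simp
  rw [hidx]
  simp [List.set_append_right _ _ (Nat.le_refl pre.length)]

theorem subst_fold_eq_fill (t : List Char) : ∀ (k i0 : Nat) (comb pre : List Char),
    pre.length = k → i0 + cx t ≤ comb.length →
    (PySem.List.enumerate ((posNat t).map (fun p => ((p + k : Nat) : Int))) (i0 : Int)).foldl
        (fun perm ipos => PySem.List.pySetD perm ipos.2 (PySem.List.pyGetD comb ipos.1 ' '))
        (pre ++ t)
      = pre ++ fill t (comb.drop i0) := by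
  induction t with
  | nil => intro k i0 comb pre hk hlen; simp [posNat, fill]
  | cons c t ih =>
    intro k i0 comb pre hk hlen
    by_cases hc : c = 'X'
    · subst hc
      rw [cx_X] at hlen
      have hi0 : i0 < comb.length := by omega
      rw [show posNat ('X' :: t) = 0 :: (posNat t).map (· + 1) from by simp [posNat],
          List.map_cons, List.map_map,
          show (fun p => ((p + k : Nat) : Int)) ∘ (fun p => p + 1)
            = fun p => ((p + (k + 1) : Nat) : Int) from by
              funext p; simp only [Function.comp_apply]; congr 1; omega,
          PySem.List.enumerate_cons, List.foldl_cons]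
      have hget : PySem.List.pyGetD comb ((i0 : Nat) : Int) ' ' = comb[i0] := by
        rw [PySem.List.pyGetD_natCast]
        exact List.getD_eq_getElem comb ' ' hi0
      have hset : PySem.List.pySetD (pre ++ 'X' :: t) (((0 + k : Nat) : Nat) : Int)
            (PySem.List.pyGetD comb ((i0 : Nat) : Int) ' ') = pre ++ comb[i0] :: t := by
        rw [hget, show (((0 + k : Nat) : Nat) : Int) = (pre.length : Int) from by simp [hk]]
        exact pySetD_mid pre 'X' t comb[i0]
      rw [hset,
          show pre ++ comb[i0] :: t = (pre ++ [comb[i0]]) ++ t from by simp,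
          show ((i0 : Nat) : Int) + 1 = ((i0 + 1 : Nat) : Int) from by push_cast; ring,
          ih (k + 1) (i0 + 1) comb (pre ++ [comb[i0]]) (by simp [hk]) (by omega),
          List.drop_eq_getElem_cons hi0]
      simp [fill]
    · rw [cx_nonX c t hc] at hlen
      rw [show posNat (c :: t) = (posNat t).map (· + 1) from by simp [posNat, hc],
          List.map_map,
          show (fun p => ((p + k : Nat) : Int)) ∘ (fun p => p + 1)
            = fun p => ((p + (k + 1) : Nat) : Int) from by
              funext p; simp only [Function.comp_apply]; congr 1; omega,
          show pre ++ c :: t = (pre ++ [c]) ++ t from by simp,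
          ih (k + 1) i0 comb (pre ++ [c]) (by simp [hk]) (by omega)]
      simp [fill, hc]

theorem subst_eq_fill (s comb : List Char) (hlen : cx s ≤ comb.length) :
    (PySem.List.enumerate
        (((PySem.List.enumerate s).filter (fun pc => decide (pc.2 = 'X'))).map (fun pc => pc.1))
        0).foldl
      (fun perm ipos => PySem.List.pySetD perm ipos.2 (PySem.List.pyGetD comb ipos.1 ' '))
      s = fill s comb := by
  have h1 : ((PySem.List.enumerate s).filter (fun pc => decide (pc.2 = 'X'))).map (fun pc => pc.1)
      = (posNat s).map (fun p => ((p + 0 : Nat) : Int)) := by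
    rw [posOf_shift s 0]
    apply List.map_congr_left; intro p _; simp
  rw [h1]
  have h := subst_fold_eq_fill s 0 0 comb [] rfl (by simpa using hlen)
  simpa using h

theorem posOf_len (s : List Char) :
    (((PySem.List.enumerate s).filter (fun pc => decide (pc.2 = 'X'))).map (fun pc => pc.1)).length
      = cx s := by
  rw [posOf_shift s 0]
  simp [cx]

-- ---- assembly ----

theorem range_pow_cast (n : Nat) :
    PySem.List.pyRange 0 ((2 : Int) ^ n) 1 = (List.range (2 ^ n)).map (fun (k : Nat) => (k : Int)) := by
  rw [PySem.List.pyRange_one]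
  have h2 : ((2 : Int) ^ n - 0).toNat = 2 ^ n := by
    rw [show ((2 : Int) ^ n) = ((2 ^ n : Nat) : Int) from by push_cast; ring, Int.sub_zero,
      Int.toNat_natCast]
  rw [h2]
  apply List.map_congr_left
  intro k _; simp

theorem pb_len_ge (n : Nat) : ∀ w ∈ (List.range (2 ^ n)).map (pb n), n ≤ w.length := by
  rcases Nat.eq_zero_or_pos n with rfl | hpos
  · intro w _; omega
  · rw [map_pb_eq_bits n hpos]
    intro w hw
    rw [bits_len n w hw]

theorem final_core (t : List Char) :
    ((List.range (2 ^ cx t)).map (pb (cx t))).map (fill t) = expandAlt t := by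
  rcases Nat.eq_zero_or_pos (cx t) with h0 | hpos
  · rw [h0, expandAlt_noX t h0]
    show [fill t (pb 0 0)] = [t]
    rw [pb_zero, fill_noX t h0]
  · rw [map_pb_eq_bits _ hpos, map_fill_bits]

theorem foldl_step_eq (t : List Char) : ∀ (exps : List (List Char)),
    t.foldl
        (fun exps ch =>
          if ch = 'X' then exps.flatMap (fun e => ['0', '1'].map (fun b => e ++ [b]))
          else exps.map (fun e => e ++ [ch]))
        exps
      = exps.flatMap (fun e => (expandAlt t).map (fun w => e ++ w)) := by
  induction t with
  | nil => intro exps; simp [expandAlt]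
  | cons c t ih =>
    intro exps
    rw [List.foldl_cons, ih]
    by_cases hc : c = 'X'
    · subst hc
      rw [if_pos rfl,
          show expandAlt ('X' :: t)
            = (expandAlt t).map (fun r => '0' :: r) ++ (expandAlt t).map (fun r => '1' :: r)
            from by simp [expandAlt],
          List.flatMap_assoc]
      apply List.flatMap_congr
      intro e _
      simp [Function.comp_def]
    · rw [if_neg hc,
          show expandAlt (c :: t) = (expandAlt t).map (fun r => c :: r)
            from by simp [expandAlt, hc],
          List.flatMap_map]
      apply List.flatMap_congr
      intro e _
      simp only [Function.comp_apply, List.map_map]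
      apply List.map_congr_left
      intro w _
      simp

theorem alt_eq_expand (ma : String) :
    find_permutations_alt ma = (expandAlt ma.toList).map (fun r => String.ofList r) := by
  unfold find_permutations_alt
  rw [foldl_step_eq]
  simp

theorem find_permutations_eq (ma : String) :
    find_permutations ma = find_permutations_alt ma := by
  rw [alt_eq_expand]
  simp only [find_permutations]
  rw [posOf_len ma.toList, range_pow_cast, List.map_map,
      show ((fun x => PySem.Chars.zfill (PySem.Int.toBinChars x) ((cx ma.toList : Nat) : Int))
            ∘ (fun (k : Nat) => (k : Int))) = pb (cx ma.toList) from by funext x; rfl]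
  rw [PySem.List.foldl_append_singleton_eq_map
        (fun comb => String.ofList
          ((PySem.List.enumerate
              (((PySem.List.enumerate ma.toList).filter (fun pc => decide (pc.2 = 'X'))).map
                (fun pc => pc.1)) 0).foldl
            (fun perm ipos => PySem.List.pySetD perm ipos.2 (PySem.List.pyGetD comb ipos.1 ' '))
            ma.toList)),
      List.nil_append]
  have hsub : ∀ comb ∈ (List.range (2 ^ cx ma.toList)).map (pb (cx ma.toList)),
      String.ofList
          ((PySem.List.enumerate
              (((PySem.List.enumerate ma.toList).filter (fun pc => decide (pc.2 = 'X'))).map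
                (fun pc => pc.1)) 0).foldl
            (fun perm ipos => PySem.List.pySetD perm ipos.2 (PySem.List.pyGetD comb ipos.1 ' '))
            ma.toList)
        = String.ofList (fill ma.toList comb) := by
    intro comb hcomb
    rw [subst_eq_fill ma.toList comb (pb_len_ge _ comb hcomb)]
  rw [List.map_congr_left hsub,
      show (fun comb => String.ofList (fill ma.toList comb))
        = String.ofList ∘ (fill ma.toList) from rfl,
      ← List.map_map, final_core]

-- ===== VERDICT (by name: the statement is the Claim_ definition above) =====
theorem find_permutations_spec : Claim_equal_find_permutations := by
  intro ma _
  unfold Spec_find_permutations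
  exact find_permutations_eq ma
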